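-- pv_equiv track=rewrite | github.com/jsbattig/code-indexer | src/code_indexer/server/auth/password_strength_validator.py | _contains_personal_info
-- ===== SOURCE A (Python) =====
-- from typing import Dict, List, Optional, Set, Tuple, Any
--
-- def _contains_personal_info(
--     password: str, username: Optional[str] = None, email: Optional[str] = None
-- ) -> bool:
--     """
--     Check if password contains personal information.
--
--     Args:
--         password: Password to check
--         username: User's username
--         email: User's email address
--
--     Returns:
--         True if password contains personal info, False otherwise
--     """
--     password_lower = password.lower()
--
--     # Check username
--     if username and len(username) > 2:
--         if username.lower() in password_lower:
--             return True
--
--     # Check email components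
--     if email:
--         email_lower = email.lower()
--         local_part = email_lower.split("@")[0]
--
--         # Check full local part
--         if len(local_part) > 2 and local_part in password_lower:
--             return True
--
--         # Check email parts separated by dots
--         email_parts = local_part.split(".")
--         for part in email_parts:
--             if len(part) > 2 and part in password_lower:
--                 return True
--
--         # Check domain parts
--         if "@" in email_lower:
--             domain = email_lower.split("@")[1]
--             domain_parts = domain.split(".")
--             for part in domain_parts:
--                 if len(part) > 3 and part in password_lower:
--                     return True
--
--     return False
-- ===== SOURCE B (Python) =====
-- def _contains_personal_info(password, username=None, email=None):
--     """Multi-pattern single scan: collect forbidden substrings, then slide one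
--     window over the password and compare slices, instead of repeated `in` tests."""
--     candidates = []
--     if username:
--         candidates.append((username.lower(), 2))
--     if email:
--         email_lower = email.lower()
--         local = email_lower.split("@")[0]
--         candidates.append((local, 2))
--         candidates += [(p, 2) for p in local.split(".")]
--         if "@" in email_lower:
--             candidates += [(p, 3) for p in email_lower.split("@")[1].split(".")]
--     cands = [s for s, t in candidates if len(s) > t]
--     pl = password.lower()
--     for i in range(len(pl) + 1):
--         for s in cands:
--             if pl.startswith(s, i):
--                 return True
--     return False
-- ===== Notes on version B (the rewrite author's own statement) =====
-- stated objective: alternative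
-- what changed: Instead of A's interleaved early-return `in` tests per candidate, B collects the forbidden substrings once and then does a single sliding-window scan over the password, testing every candidate at each offset with startswith(s, i) (naive multi-pattern matching).
import Mathlib
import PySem

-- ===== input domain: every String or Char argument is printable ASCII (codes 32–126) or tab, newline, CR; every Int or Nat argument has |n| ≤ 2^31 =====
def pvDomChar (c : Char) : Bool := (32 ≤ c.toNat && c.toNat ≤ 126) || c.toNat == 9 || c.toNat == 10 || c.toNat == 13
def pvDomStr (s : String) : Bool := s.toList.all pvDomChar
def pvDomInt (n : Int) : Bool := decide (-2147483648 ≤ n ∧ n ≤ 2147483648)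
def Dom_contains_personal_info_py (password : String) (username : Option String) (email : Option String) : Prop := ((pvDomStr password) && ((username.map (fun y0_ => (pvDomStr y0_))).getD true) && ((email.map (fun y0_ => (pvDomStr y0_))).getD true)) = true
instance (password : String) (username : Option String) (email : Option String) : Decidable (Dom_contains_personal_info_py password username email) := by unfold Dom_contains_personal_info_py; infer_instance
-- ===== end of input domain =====

-- B replaces A's per-candidate builtin substring tests by one sliding-window scan over the
-- password, comparing an explicit slice against every collected forbidden substring; same cost.
-- ===== PORT A =====
def contains_personal_info_py (password : String) (username : Option String) (email : Option String) : Bool :=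
  -- password_lower = password.lower(); early 'return True's become nested ifs
  if (match username with
      | none => false
      | some u =>
        if u ≠ "" && decide (2 < PySem.Str.len u) then
          PySem.Str.isIn (PySem.Str.lower u) (PySem.Str.lower password)
        else false) then true
  else match email with
    | none => false
    | some e =>
      if e = "" then false
      else
        -- local_part = email_lower.split("@")[0]
        if decide (2 < PySem.Str.len (PySem.List.pyGetD ((PySem.Str.split? (PySem.Str.lower e) "@").getD []) 0 "")) &&
           PySem.Str.isIn (PySem.List.pyGetD ((PySem.Str.split? (PySem.Str.lower e) "@").getD []) 0 "") (PySem.Str.lower password) then true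
        else if ((PySem.Str.split? (PySem.List.pyGetD ((PySem.Str.split? (PySem.Str.lower e) "@").getD []) 0 "") ".").getD []).any
                  (fun part => decide (2 < PySem.Str.len part) && PySem.Str.isIn part (PySem.Str.lower password)) then true
        else if PySem.Str.isIn "@" (PySem.Str.lower e) then
          ((PySem.Str.split? (PySem.List.pyGetD ((PySem.Str.split? (PySem.Str.lower e) "@").getD []) 1 "") ".").getD []).any
            (fun part => decide (3 < PySem.Str.len part) && PySem.Str.isIn part (PySem.Str.lower password))
        else false

-- ===== PORT B =====
def contains_personal_info_py_alt (password : String) (username : Option String) (email : Option String) : Bool :=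
  let candidates : List (String × Int) :=
    (match username with
     | none => []
     | some u => if u ≠ "" then [(PySem.Str.lower u, (2 : Int))] else []) ++
    (match email with
     | none => []
     | some e =>
       if e ≠ "" then
         ((PySem.List.pyGetD ((PySem.Str.split? (PySem.Str.lower e) "@").getD []) 0 "", (2 : Int)) ::
           ((PySem.Str.split? (PySem.List.pyGetD ((PySem.Str.split? (PySem.Str.lower e) "@").getD []) 0 "") ".").getD []).map (fun p => (p, (2 : Int)))) ++
         (if PySem.Str.isIn "@" (PySem.Str.lower e) then
           ((PySem.Str.split? (PySem.List.pyGetD ((PySem.Str.split? (PySem.Str.lower e) "@").getD []) 1 "") ".").getD []).map (fun p => (p, (3 : Int)))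
          else [])
       else [])
  -- cands = [s for s, t in candidates if len(s) > t]
  let cands : List String := (candidates.filter (fun st => decide (st.2 < PySem.Str.len st.1))).map Prod.fst
  let pl := PySem.Str.lower password
  -- sliding-window scan: for i in range(len(pl)+1): for s in cands: if pl.startswith(s, i): return True
  -- pl.startswith(s, i) reads i as a slice bound, so it is exactly pl[i:].startswith(s)
  (PySem.List.pyRange 0 (PySem.Str.len pl + 1) 1).any (fun i =>
    cands.any (fun s => PySem.Str.startswith (PySem.Str.slice pl (some i) none) s))

-- ===== PRECONDITION & SPEC =====
def Spec_contains_personal_info_py (password : String) (username : Option String) (email : Option String) (out : Bool) : Prop := out = contains_personal_info_py_alt password username email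
instance (password : String) (username : Option String) (email : Option String) (out : Bool) : Decidable (Spec_contains_personal_info_py password username email out) := by unfold Spec_contains_personal_info_py; infer_instance

-- ===== CLAIM (what is proved, stated in full; the proofs are below) =====
def Claim_equal_contains_personal_info_py : Prop := ∀ (password : String) (username : Option String) (email : Option String), Dom_contains_personal_info_py password username email → Spec_contains_personal_info_py password username email (contains_personal_info_py password username email)

-- ===== LEMMAS AND PROOFS =====

theorem pv_ite_or (c x : Bool) : (if c = true then true else x) = (c || x) := by
  cases c <;> simp

theorem pv_length_lower (u : String) : (PySem.Str.lower u).length = u.length := by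
  simp [← String.length_toList, PySem.Str.toList_lower, PySem.Chars.lower]

theorem pv_any_swap {α β : Type} (l1 : List α) (l2 : List β) (f : α → β → Bool) :
    (l1.any fun a => l2.any fun b => f a b) = (l2.any fun b => l1.any fun a => f a b) := by
  rw [Bool.eq_iff_iff]
  simp only [List.any_eq_true]
  constructor <;> rintro ⟨x, hx, y, hy, h⟩ <;> exact ⟨y, hy, x, hx, h⟩

theorem pv_any_congr_mem {α : Type} (l : List α) (p q : α → Bool)
    (h : ∀ a ∈ l, p a = q a) : l.any p = l.any q := by
  induction l with
  | nil => rfl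
  | cons a t ih =>
    simp only [List.any_cons, h a (List.mem_cons_self ..),
      ih (fun x hx => h x (List.mem_cons_of_mem _ hx))]

-- one sliding-window scan for ONE nonempty pattern equals Python's `sub in pl`
theorem pv_scan_eq (pl sub : String) (h : sub.toList ≠ []) :
    ((PySem.List.pyRange 0 (PySem.Str.len pl + 1) 1).any fun i =>
        PySem.Str.startswith (PySem.Str.slice pl (some i) none) sub)
      = PySem.Str.isIn sub pl := by
  rw [PySem.List.pyRange_one, List.any_map, PySem.Str.isIn_eq, Bool.eq_iff_iff,
    List.any_eq_true, ← PySem.Chars.exists_prefix_drop_iff_isIn]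
  have hn : (PySem.Str.len pl + 1 - 0).toNat = pl.toList.length + 1 := by
    rw [PySem.Str.len_eq]; omega
  rw [hn]
  simp only [Function.comp_apply]
  have key : ∀ k : ℕ,
      PySem.Str.startswith (PySem.Str.slice pl (some ((0 : Int) + ↑k)) none) sub = true
        ↔ sub.toList <+: pl.toList.drop k := by
    intro k
    rw [PySem.Str.startswith_eq, PySem.Str.toList_slice, PySem.Chars.slice_eq_listSlice,
      zero_add, PySem.List.slice_from_natCast]
    exact PySem.Chars.startswith_iff _ _
  constructor
  · rintro ⟨k, _, hk⟩
    exact ⟨k, (key k).mp hk⟩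
  · rintro ⟨j, hj⟩
    have hjle : j ≤ pl.toList.length := by
      by_contra hgt
      have : pl.toList.drop j = [] := List.drop_eq_nil_of_le (by omega)
      rw [this] at hj
      exact h (List.prefix_nil.mp hj)
    exact ⟨j, List.mem_range.mpr (by omega), (key j).mpr hj⟩

-- the whole scan over the filtered candidate list equals the per-candidate `in` tests
theorem pv_cands_scan (pl : String) (candidates : List (String × Int))
    (hc : ∀ st ∈ candidates, 0 ≤ st.2) :
    ((PySem.List.pyRange 0 (PySem.Str.len pl + 1) 1).any fun i =>
        ((candidates.filter fun st => decide (st.2 < PySem.Str.len st.1)).map Prod.fst).any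
          fun s => PySem.Str.startswith (PySem.Str.slice pl (some i) none) s)
      = candidates.any fun st => decide (st.2 < PySem.Str.len st.1) && PySem.Str.isIn st.1 pl := by
  rw [pv_any_swap, List.any_map, List.any_filter]
  refine pv_any_congr_mem _ _ _ (fun st hst => ?_)
  by_cases hlt : st.2 < PySem.Str.len st.1
  · have hne : st.1.toList ≠ [] := by
      have h0 := hc st hst
      rw [PySem.Str.len_eq] at hlt
      intro hnil
      rw [hnil] at hlt
      simp at hlt
      omega
    simp only [hlt, decide_true, Bool.true_and, Function.comp]
    exact pv_scan_eq pl st.1 hne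
  · rw [PySem.Str.len_eq] at hlt
    rw [String.length_toList] at hlt
    simp [hlt, PySem.Str.len_eq]

-- the email branch of A, with every string-level subterm generalized away
theorem pv_email_core (pl lp dom : String) (hasAt : Bool) :
    (if decide (2 < PySem.Str.len lp) && PySem.Str.isIn lp pl then true
     else if ((PySem.Str.split? lp ".").getD []).any
               (fun part => decide (2 < PySem.Str.len part) && PySem.Str.isIn part pl) then true
     else if hasAt then
       ((PySem.Str.split? dom ".").getD []).any
         (fun part => decide (3 < PySem.Str.len part) && PySem.Str.isIn part pl)
     else false)
    = (((lp, (2 : Int)) :: ((PySem.Str.split? lp ".").getD []).map (fun p => (p, (2 : Int)))) ++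
        (if hasAt then ((PySem.Str.split? dom ".").getD []).map (fun p => (p, (3 : Int))) else [])).any
        (fun st => decide (st.2 < PySem.Str.len st.1) && PySem.Str.isIn st.1 pl) := by
  generalize ((PySem.Str.split? lp ".").getD []) = parts
  generalize ((PySem.Str.split? dom ".").getD []) = dparts
  have h2 : ∀ t : Int, ∀ l : List String,
      (l.map (fun p => (p, t))).any
          (fun st => decide (st.2 < PySem.Str.len st.1) && PySem.Str.isIn st.1 pl)
        = l.any (fun part => decide (t < PySem.Str.len part) && PySem.Str.isIn part pl) := by
    intro t l
    rw [List.any_map]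
    rfl
  rw [pv_ite_or, pv_ite_or, List.any_append, List.any_cons, h2]
  cases hasAt <;> simp [Bool.or_assoc, List.any_map, Function.comp_def]

-- B = candidates.any (len-gate && isIn); bridges the scan form back to per-candidate form
theorem pv_alt_eq (password : String) (username : Option String) (email : Option String) :
    contains_personal_info_py_alt password username email
      = ((match username with
          | none => []
          | some u => if u ≠ "" then [(PySem.Str.lower u, (2 : Int))] else []) ++
         (match email with
          | none => []
          | some e =>
            if e ≠ "" then
              ((PySem.List.pyGetD ((PySem.Str.split? (PySem.Str.lower e) "@").getD []) 0 "", (2 : Int)) ::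
                ((PySem.Str.split? (PySem.List.pyGetD ((PySem.Str.split? (PySem.Str.lower e) "@").getD []) 0 "") ".").getD []).map (fun p => (p, (2 : Int)))) ++
              (if PySem.Str.isIn "@" (PySem.Str.lower e) then
                ((PySem.Str.split? (PySem.List.pyGetD ((PySem.Str.split? (PySem.Str.lower e) "@").getD []) 1 "") ".").getD []).map (fun p => (p, (3 : Int)))
               else [])
            else [])).any
        (fun st => decide (st.2 < PySem.Str.len st.1) && PySem.Str.isIn st.1 (PySem.Str.lower password)) := by
  unfold contains_personal_info_py_alt
  refine pv_cands_scan (PySem.Str.lower password) _ (fun st hst => ?_)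
  rcases List.mem_append.mp hst with h | h
  · rcases username with _ | u
    · simp at h
    · by_cases hu : u = "" <;> simp [hu] at h
      rcases h with ⟨h1, h2⟩
      omega
  · rcases email with _ | e
    · simp at h
    · by_cases he : e = ""
      · simp [he] at h
      · by_cases hat : PySem.Str.isIn "@" (PySem.Str.lower e) = true
        · simp only [he, hat, ne_eq, not_false_iff, ite_true, List.mem_append, List.mem_cons,
            List.mem_map] at h
          rcases h with (h | ⟨p, _, h⟩) | ⟨p, _, h⟩
          · rw [h]; omega
          · rw [← h]; omega
          · rw [← h]; omega
        · simp only [he, hat, ne_eq, not_false_iff, ite_true, ite_false, List.append_nil,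
            List.mem_cons, List.mem_map, Bool.false_eq_true] at h
          rcases h with h | ⟨p, _, h⟩
          · rw [h]; omega
          · rw [← h]; omega

-- ===== VERDICT (by name: the statement is the Claim_ definition above) =====
theorem contains_personal_info_py_spec : Claim_equal_contains_personal_info_py := by
  intro password username email _
  unfold Spec_contains_personal_info_py contains_personal_info_py
  rw [pv_alt_eq]
  cases username with
  | none =>
    cases email with
    | none => simp
    | some e =>
      by_cases he : e = ""
      · simp [he]
      · simp only [he, ite_true, ne_eq, not_false_iff, List.nil_append, Bool.false_eq_true,
          if_false]
        exact pv_email_core (PySem.Str.lower password) _ _ _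
  | some u =>
    have huhit : (if (u ≠ "" && decide (2 < PySem.Str.len u)) = true then
          PySem.Str.isIn (PySem.Str.lower u) (PySem.Str.lower password) else false)
        = (if u ≠ "" then [(PySem.Str.lower u, (2 : Int))] else []).any
            (fun st => decide (st.2 < PySem.Str.len st.1) && PySem.Str.isIn st.1 (PySem.Str.lower password)) := by
      by_cases hu : u = "" <;> simp [hu, pv_length_lower, PySem.Str.len_eq]
    cases email with
    | none =>
      simp only [List.append_nil]
      rw [pv_ite_or, huhit]
      simp
    | some e =>
      by_cases he : e = ""
      · simp only [he, ne_eq, not_true_eq_false, ite_false, List.append_nil]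
        rw [pv_ite_or, huhit]
        simp
      · simp only [he, ne_eq, not_false_iff, ite_true, if_false]
        rw [pv_ite_or, huhit, List.any_append, ← pv_email_core (PySem.Str.lower password)]
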